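-- pv_equiv track=rewrite | github.com/12sliu/12sliu---BIO-Practice | BIO practice/2010/q1/2010q1c_Anagram_Numbers.py | check_if_anagram
-- ===== SOURCE A (Python) =====
-- def check_if_anagram(num):
--     arr = [0 for i in range(1, 11)]
--
--     for i in str(num):
--         arr[int(i)] = arr[int(i)] + 1
--
--     for i in range(2, 10):
--         test = num * i
--         testarr = [0 for i in range(1, 11)]
--         for j in str(test):
--             testarr[int(j)] = testarr[int(j)] + 1
--         if testarr == arr:
--             return True
--     return False
-- ===== SOURCE B (Python) =====
-- def check_if_anagram(num):
--     # Backtracking search: build permutations of str(num)'s characters digit by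
--     # digit, pruning any partial permutation that is not a prefix of one of the
--     # candidate multiples (num*i for i in range(2, 10)); succeed when a full permutation equals a multiple.
--     targets = {str(num * i) for i in range(2, 10)}
--
--     def extend(prefix, rest):
--         if not rest:
--             return prefix in targets
--         for k in range(len(rest)):
--             cand = prefix + rest[k]
--             if any(t.startswith(cand) for t in targets):
--                 if extend(cand, rest[:k] + rest[k + 1:]):
--                     return True
--         return False
--
--     return extend("", str(num))
-- ===== Notes on version B (the rewrite author's own statement) =====
-- stated objective: alternative
-- what changed: B replaces A's canonicalize-and-compare strategy (a digit-count array for num rebuilt and compared for each multiple) by a generate-and-test backtracking search that extends permutations of str(num) character by character, pruning partial permutations that prefix none of the candidate multiples.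
import Mathlib
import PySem

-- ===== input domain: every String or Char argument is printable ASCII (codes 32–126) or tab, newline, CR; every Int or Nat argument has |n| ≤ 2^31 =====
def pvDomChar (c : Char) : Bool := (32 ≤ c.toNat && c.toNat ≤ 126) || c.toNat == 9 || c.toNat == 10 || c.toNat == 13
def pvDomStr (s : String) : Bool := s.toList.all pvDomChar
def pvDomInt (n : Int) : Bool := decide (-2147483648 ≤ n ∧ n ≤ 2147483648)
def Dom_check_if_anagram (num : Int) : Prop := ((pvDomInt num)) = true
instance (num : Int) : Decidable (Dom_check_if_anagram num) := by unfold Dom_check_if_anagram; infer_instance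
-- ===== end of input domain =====

-- B replaces A's canonicalize-and-compare (digit-count arrays per multiple) by a pruned
-- backtracking search over permutations of str(num) tested against the candidate multiples.

-- ===== PORT A =====
-- int(c) for a one-character string c (none = ValueError, as in Python)
def pvDigit (c : Char) : Int := (PySem.Int.ofStr? (String.mk [c])).getD 0

-- `arr[int(i)] = arr[int(i)] + 1` (index is in 0..9 on every input Pre_ admits)
def pvBump (arr : List Int) (i : Int) : List Int := arr.set i.toNat (arr.getD i.toNat 0 + 1)

-- A's counting loop: `arr = [0]*10; for c in s: arr[int(c)] += 1`
def pvCount (s : List Char) : List Int :=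
  s.foldl (fun arr c => pvBump arr (pvDigit c)) ((PySem.List.pyRange 1 11 1).map (fun _ => (0 : Int)))

def check_if_anagram (num : Int) : Bool :=
  let arr := pvCount (PySem.Int.toChars num)
  (PySem.List.pyRange 2 10 1).any (fun i => pvCount (PySem.Int.toChars (num * i)) == arr)

-- ===== PORT B =====
-- `targets = {str(num * i) for i in range(2, 10)}` (strings as List Char)
def pvTargets (num : Int) : PySem.Set (List Char) :=
  PySem.Set.ofList ((PySem.List.pyRange 2 10 1).map (fun i => PySem.Int.toChars (num * i)))

-- B's recursive `extend(prefix, rest)`: the loop over k becomes `any` over the indices;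
-- the extra Nat argument is pure fuel (always called with fuel = rest.length) making the
-- recursion structural; the branch structure is exactly Source B's.
def pvExtendN (T : List (List Char)) : Nat → List Char → List Char → Bool
  | 0, pre, rest => if rest.isEmpty then PySem.Set.contains T pre else false
  | n + 1, pre, rest =>
    if rest.isEmpty then PySem.Set.contains T pre
    else
      (List.range rest.length).any (fun k =>
        if T.any (fun t => PySem.Chars.startswith t (pre ++ [rest.getD k ' '])) then
          pvExtendN T n (pre ++ [rest.getD k ' ']) (rest.eraseIdx k)
        else false)

def pvExtend (T : List (List Char)) (pre rest : List Char) : Bool :=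
  pvExtendN T rest.length pre rest

def check_if_anagram_alt (num : Int) : Bool :=
  pvExtend (pvTargets num) [] (PySem.Int.toChars num)

-- ===== PRECONDITION & SPEC =====
-- Pre_ excludes negative num, on which A raises ValueError at int('-').
def Pre_check_if_anagram (num : Int) : Prop := 0 ≤ num
instance (num : Int) : Decidable (Pre_check_if_anagram num) := by unfold Pre_check_if_anagram; infer_instance
def pvWitness_check_if_anagram : Int := (125874)

def Spec_check_if_anagram (num : Int) (out : Bool) : Prop := out = check_if_anagram_alt num
instance (num : Int) (out : Bool) : Decidable (Spec_check_if_anagram num out) := by unfold Spec_check_if_anagram; infer_instance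

-- ===== CLAIM (what is proved, stated in full; the proofs are below) =====
def Claim_equal_check_if_anagram : Prop := ∀ (num : Int), Dom_check_if_anagram num → Pre_check_if_anagram num → Spec_check_if_anagram num (check_if_anagram num)
-- ===== LEMMAS AND PROOFS =====

-- every character produced by Nat.toDigitsCore 10 is a digit character (or came from the accumulator)
lemma pv_mem_toDigitsCore (fuel : Nat) : ∀ (n : Nat) (acc : List Char), ∀ c ∈ Nat.toDigitsCore 10 fuel n acc,
    c ∈ acc ∨ ∃ d : Nat, d < 10 ∧ c = Nat.digitChar d := by
  induction fuel with
  | zero => intro n acc c hc; exact Or.inl hc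
  | succ fuel ih =>
    intro n acc c hc
    simp only [Nat.toDigitsCore] at hc
    by_cases h : n / 10 = 0
    · rw [if_pos h, List.mem_cons] at hc
      rcases hc with h1 | h1
      · exact Or.inr ⟨n % 10, Nat.mod_lt _ (by norm_num), h1⟩
      · exact Or.inl h1
    · rw [if_neg h] at hc
      rcases ih _ _ _ hc with h1 | h1
      · rcases List.mem_cons.mp h1 with h2 | h2
        · exact Or.inr ⟨n % 10, Nat.mod_lt _ (by norm_num), h2⟩
        · exact Or.inl h2
      · exact Or.inr h1

lemma pv_digit_digitChar (d : Nat) (hd : d < 10) : pvDigit (Nat.digitChar d) = (d : Int) := by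
  interval_cases d <;> decide

lemma pv_digitChar_inj (e d : Nat) (he : e < 10) (hd : d < 10) (h : Nat.digitChar e = Nat.digitChar d) : e = d := by
  interval_cases e <;> interval_cases d <;> simp_all <;> exact absurd h (by decide)

-- every char of str(m), m ≥ 0, is a digit character
lemma pv_toChars_digitchars (m : Int) (hm : 0 ≤ m) :
    ∀ c ∈ PySem.Int.toChars m, ∃ d : Nat, d < 10 ∧ c = Nat.digitChar d := by
  intro c hc
  have hc' : c ∈ Nat.toDigitsCore 10 (m.toNat + 1) m.toNat [] := by
    simpa [PySem.Int.toChars, Nat.toDigits, not_lt.mpr hm] using hc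
  rcases pv_mem_toDigitsCore _ _ _ _ hc' with h | h
  · simp at h
  · exact h

lemma pv_getD_set (arr : List Int) (d k : Nat) (v : Int) (hk : k < arr.length) (hd : d < arr.length) :
    (arr.set d v).getD k 0 = if k = d then v else arr.getD k 0 := by
  by_cases h : k = d
  · subst h
    rw [List.getD_eq_getElem _ _ (by simpa using hk), List.getElem_set_self]
    simp
  · rw [List.getD_eq_getElem _ _ (by simpa using hk),
      List.getElem_set_ne (fun hh => h hh.symm), if_neg h, List.getD_eq_getElem _ _ hk]

-- A's counting loop computes, in slot k, base + number of occurrences of k among the digit values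
lemma pv_count_fold (s : List Char) (hs : ∀ c ∈ s, ∃ d : Nat, d < 10 ∧ c = Nat.digitChar d) :
    ∀ arr : List Int, arr.length = 10 →
      (s.foldl (fun arr c => pvBump arr (pvDigit c)) arr).length = 10 ∧
      ∀ k : Nat, k < 10 →
        (s.foldl (fun arr c => pvBump arr (pvDigit c)) arr).getD k 0
          = arr.getD k 0 + ((s.map pvDigit).count ((k : Int)) : Int) := by
  induction s with
  | nil => intro arr h; exact ⟨h, fun k hk => by simp⟩
  | cons c t ih =>
    intro arr harr
    rcases hs c List.mem_cons_self with ⟨d, hd, hdv⟩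
    have ht : ∀ c ∈ t, ∃ d : Nat, d < 10 ∧ c = Nat.digitChar d := by
      intro x hx; exact hs x (List.mem_cons.mpr (Or.inr hx))
    have hb : (pvBump arr (pvDigit c)).length = 10 := by simp [pvBump, harr]
    rcases ih ht (pvBump arr (pvDigit c)) hb with ⟨hl, hg⟩
    refine ⟨by simpa using hl, ?_⟩
    intro k hk
    rw [List.foldl_cons, hg k hk]
    have hdv' : pvDigit c = (d : Int) := by rw [hdv]; exact pv_digit_digitChar d hd
    have hset : (pvBump arr (pvDigit c)).getD k 0
        = arr.getD k 0 + (if k = d then (1 : Int) else 0) := by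
      rw [hdv']
      simp only [pvBump, Int.toNat_natCast]
      rw [pv_getD_set arr d k _ (by omega) (by omega)]
      by_cases hkd : k = d
      · subst hkd; simp
      · simp [hkd]
    rw [hset, List.map_cons, List.count_cons, hdv']
    have hbeq : (((d : Int)) == ((k : Int))) = decide (k = d) := by
      by_cases hkd : k = d
      · simp [hkd]
      · have hne : ¬ ((d : Int) = (k : Int)) := by
          intro hh
          exact hkd (Nat.cast_inj.mp hh).symm
        simp [hkd, hne]
    rw [hbeq]
    by_cases hkd : k = d <;> simp [hkd] <;> omega

lemma pv_count_spec (s : List Char) (hs : ∀ c ∈ s, ∃ d : Nat, d < 10 ∧ c = Nat.digitChar d) :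
    (pvCount s).length = 10 ∧
    ∀ k : Nat, k < 10 → (pvCount s).getD k 0 = ((s.map pvDigit).count ((k : Int)) : Int) := by
  have h0 : ((PySem.List.pyRange 1 11 1).map (fun _ => (0 : Int))).length = 10 := by decide
  rcases pv_count_fold s hs _ h0 with ⟨hl, hg⟩
  refine ⟨hl, fun k hk => ?_⟩
  rw [pvCount, hg k hk]
  have h1 : ((PySem.List.pyRange 1 11 1).map (fun _ => (0 : Int))).getD k 0 = 0 := by
    interval_cases k <;> decide
  rw [h1]; ring

-- counting the digit VALUE d in map pvDigit s is counting the digit CHARACTER of d in s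
lemma pv_count_char (s : List Char) (hs : ∀ c ∈ s, ∃ d : Nat, d < 10 ∧ c = Nat.digitChar d)
    (d : Nat) (hd : d < 10) :
    (s.map pvDigit).count ((d : Int)) = s.count (Nat.digitChar d) := by
  induction s with
  | nil => simp
  | cons a t ih =>
    rcases hs a List.mem_cons_self with ⟨e, he, rfl⟩
    have ht : ∀ c ∈ t, ∃ d : Nat, d < 10 ∧ c = Nat.digitChar d :=
      fun x hx => hs x (List.mem_cons.mpr (Or.inr hx))
    rw [List.map_cons, List.count_cons, List.count_cons, ih ht]
    congr 1
    rw [pv_digit_digitChar e he]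
    by_cases hed : e = d
    · subst hed; simp
    · have h1 : ¬ ((e : Int) = (d : Int)) := fun hh => hed (Nat.cast_inj.mp hh)
      have h2 : ¬ (Nat.digitChar e = Nat.digitChar d) := fun hh => hed (pv_digitChar_inj e d he hd hh)
      simp [h1, h2]

-- A's per-multiple test: the two count arrays are equal iff the character lists are permutations
lemma pv_counteq_iff_perm (s1 s2 : List Char)
    (h1 : ∀ c ∈ s1, ∃ d : Nat, d < 10 ∧ c = Nat.digitChar d)
    (h2 : ∀ c ∈ s2, ∃ d : Nat, d < 10 ∧ c = Nat.digitChar d) :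
    (pvCount s1 == pvCount s2) = true ↔ s1.Perm s2 := by
  rcases pv_count_spec s1 h1 with ⟨hl1, hg1⟩
  rcases pv_count_spec s2 h2 with ⟨hl2, hg2⟩
  simp only [beq_iff_eq]
  constructor
  · intro h
    rw [List.perm_iff_count]
    intro c
    by_cases hc : ∃ d : Nat, d < 10 ∧ c = Nat.digitChar d
    · rcases hc with ⟨d, hd, rfl⟩
      have h' : (((s1.map pvDigit).count ((d : Int)) : Int)) = (((s2.map pvDigit).count ((d : Int)) : Int)) := by
        rw [← hg1 d hd, ← hg2 d hd, h]
      have h'' : (s1.map pvDigit).count ((d : Int)) = (s2.map pvDigit).count ((d : Int)) := by exact_mod_cast h'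
      rw [← pv_count_char s1 h1 d hd, ← pv_count_char s2 h2 d hd, h'']
    · have n1 : c ∉ s1 := fun hm => hc (h1 c hm)
      have n2 : c ∉ s2 := fun hm => hc (h2 c hm)
      rw [List.count_eq_zero_of_not_mem n1, List.count_eq_zero_of_not_mem n2]
  · intro h
    apply List.ext_getElem (by rw [hl1, hl2])
    intro i hi1 hi2
    have hi : i < 10 := by omega
    rw [← List.getD_eq_getElem _ 0 hi1, ← List.getD_eq_getElem _ 0 hi2, hg1 i hi, hg2 i hi]
    have := List.Perm.count_eq (List.Perm.map pvDigit h) ((i : Int))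
    exact_mod_cast this

-- B's search succeeds iff some permutation q of rest completes pre to an element of T
lemma pv_extendN_iff (T : List (List Char)) :
    ∀ (n : Nat) (rest : List Char), rest.length ≤ n → ∀ (pre : List Char),
      pvExtendN T n pre rest = true ↔ ∃ q, rest.Perm q ∧ (pre ++ q) ∈ T := by
  intro n
  induction n with
  | zero =>
    intro rest hn pre
    have h0 : rest = [] := List.length_eq_zero_iff.mp (Nat.le_zero.mp hn)
    subst h0
    simp only [pvExtendN, List.isEmpty_nil, if_true]
    constructor
    · intro h
      exact ⟨[], List.Perm.refl _, by simpa using (PySem.Set.contains_iff T pre).mp h⟩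
    · rintro ⟨q, hq, hmem⟩
      have hq0 : q = [] := by
        have := hq.length_eq
        simpa [List.length_eq_zero_iff] using this.symm
      subst hq0
      exact (PySem.Set.contains_iff T pre).mpr (by simpa using hmem)
  | succ n ih =>
    intro rest hn pre
    by_cases hr : rest.isEmpty
    · have h0 : rest = [] := List.isEmpty_iff.mp hr
      subst h0
      simp only [pvExtendN, List.isEmpty_nil, if_true]
      constructor
      · intro h
        exact ⟨[], List.Perm.refl _, by simpa using (PySem.Set.contains_iff T pre).mp h⟩
      · rintro ⟨q, hq, hmem⟩
        have hq0 : q = [] := by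
          have := hq.length_eq
          simpa [List.length_eq_zero_iff] using this.symm
        subst hq0
        exact (PySem.Set.contains_iff T pre).mpr (by simpa using hmem)
    · have hlen0 : rest.length ≠ 0 := by simpa [List.isEmpty_iff_length_eq_zero] using hr
      rw [pvExtendN, if_neg hr, List.any_eq_true]
      constructor
      · rintro ⟨k, hk, hf⟩
        have hklt : k < rest.length := List.mem_range.mp hk
        split_ifs at hf with hguard
        · have hle : (rest.eraseIdx k).length ≤ n := by
            rw [List.length_eraseIdx_of_lt hklt]; omega
          rcases (ih _ hle _).mp hf with ⟨q', hq', hmem⟩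
          refine ⟨rest.getD k ' ' :: q', ?_, by simpa using hmem⟩
          refine List.Perm.trans ?_ (List.Perm.cons _ hq')
          rw [List.getD_eq_getElem _ _ hklt]
          exact (List.getElem_cons_eraseIdx_perm hklt).symm
      · rintro ⟨q, hq, hmem⟩
        rcases q with _ | ⟨c, q'⟩
        · exact absurd (by simpa using hq.length_eq) hlen0
        · have hc : c ∈ rest := hq.symm.mem_iff.mp List.mem_cons_self
          have hklt : rest.idxOf c < rest.length := List.idxOf_lt_length_of_mem hc
          have hget : rest.getD (rest.idxOf c) ' ' = c := by
            rw [List.getD_eq_getElem _ _ hklt]; exact List.getElem_idxOf hklt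
          have herase : rest.eraseIdx (rest.idxOf c) = rest.erase c :=
            List.eraseIdx_idxOf_eq_erase c rest
          have hq' : q'.Perm (rest.erase c) :=
            List.Perm.cons_inv (hq.symm.trans (List.perm_cons_erase hc))
          refine ⟨rest.idxOf c, List.mem_range.mpr hklt, ?_⟩
          simp only [hget, herase]
          have hguard : T.any (fun t => PySem.Chars.startswith t (pre ++ [c])) = true := by
            rw [List.any_eq_true]
            refine ⟨pre ++ c :: q', hmem, ?_⟩
            rw [PySem.Chars.startswith_iff]
            exact ⟨q', by simp⟩
          rw [if_pos hguard]
          have hle : (rest.erase c).length ≤ n := by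
            rw [← herase, List.length_eraseIdx_of_lt hklt]; omega
          exact (ih _ hle _).mpr ⟨q', hq'.symm, by simpa using hmem⟩

-- membership in pyRange 2 10 1
lemma pv_mem_range29 (i : Int) (h : i ∈ PySem.List.pyRange 2 10 1) : 2 ≤ i ∧ i < 10 := by
  have : PySem.List.pyRange 2 10 1 = [2, 3, 4, 5, 6, 7, 8, 9] := by decide
  rw [this] at h
  fin_cases h <;> omega

-- ===== VERDICT (by name: the statement is the Claim_ definition above) =====
theorem check_if_anagram_spec : Claim_equal_check_if_anagram := by
  intro num _ hpre
  show check_if_anagram num = check_if_anagram_alt num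
  have hpre' : (0:Int) ≤ num := hpre
  rw [Bool.eq_iff_iff]
  rw [check_if_anagram, List.any_eq_true]
  rw [check_if_anagram_alt, pvExtend,
    pv_extendN_iff (pvTargets num) _ _ (Nat.le_refl _)]
  constructor
  · rintro ⟨i, hi, hcnt⟩
    rcases pv_mem_range29 i hi with ⟨h2, _⟩
    have hperm : (PySem.Int.toChars (num * i)).Perm (PySem.Int.toChars num) :=
      (pv_counteq_iff_perm _ _
        (pv_toChars_digitchars _ (mul_nonneg hpre' (by omega)))
        (pv_toChars_digitchars _ hpre')).mp hcnt
    refine ⟨PySem.Int.toChars (num * i), hperm.symm, ?_⟩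
    rw [List.nil_append, pvTargets, PySem.Set.mem_ofList]
    exact List.mem_map.mpr ⟨i, hi, rfl⟩
  · rintro ⟨q, hq, hmem⟩
    rw [List.nil_append, pvTargets, PySem.Set.mem_ofList] at hmem
    rcases List.mem_map.mp hmem with ⟨i, hi, rfl⟩
    rcases pv_mem_range29 i hi with ⟨h2, _⟩
    refine ⟨i, hi, ?_⟩
    exact (pv_counteq_iff_perm _ _
      (pv_toChars_digitchars _ (mul_nonneg hpre' (by omega)))
      (pv_toChars_digitchars _ hpre')).mpr hq.symm
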